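-- pv_equiv track=rewrite | github.com/rkdgus0/hfl | FL_Manager.py | define_user_index
-- ===== SOURCE A (Python) =====
-- def define_user_index(n_agg, n_userset, n_user):
--     pre_user_agg = [[] for _ in range(n_agg)]
--     user_per_uset = n_user // n_userset
--     mod_user_uset = n_user % n_userset
--
--     user_uset = [user_per_uset + 1 if i < mod_user_uset else user_per_uset for i in range(n_userset)]
--
--     for j, set in enumerate(user_uset):
--         mod = j % n_agg
--         pre_user_agg[mod].append(set)
--     user_agg = [sum(pre_user_agg[k]) for k in range(n_agg)]
--
--     return user_uset, user_agg
-- ===== SOURCE B (Python) =====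
-- def define_user_index(n_agg, n_userset, n_user):
--     q, r = divmod(n_user, n_userset)
--     user_uset = [q + 1] * r + [q] * (n_userset - r)
--
--     # Group k receives the entries at indices k, k+n_agg, k+2*n_agg, ... of
--     # user_uset; each entry is q, plus 1 for indices below r.  So the group
--     # total is q*(number of such indices below n_userset) plus the number of
--     # such indices below r, both counted in closed form by ceiling division.
--     def cnt(upper, k):
--         return (upper - k + n_agg - 1) // n_agg if k < upper else 0
--
--     user_agg = [q * cnt(n_userset, k) + cnt(r, k) for k in range(n_agg)]
--     return user_uset, user_agg
-- ===== Notes on version B (the rewrite author's own statement) =====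
-- stated objective: alternative
-- what changed: B never iterates over user_uset to build user_agg: instead of A's bucket-append pass plus a summing pass, it computes each group's total arithmetically in closed form, as q times the ceiling-division count of indices in the group's residue class below n_userset plus the count below the remainder r; user_uset itself is built by list repetition from divmod.
import Mathlib
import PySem

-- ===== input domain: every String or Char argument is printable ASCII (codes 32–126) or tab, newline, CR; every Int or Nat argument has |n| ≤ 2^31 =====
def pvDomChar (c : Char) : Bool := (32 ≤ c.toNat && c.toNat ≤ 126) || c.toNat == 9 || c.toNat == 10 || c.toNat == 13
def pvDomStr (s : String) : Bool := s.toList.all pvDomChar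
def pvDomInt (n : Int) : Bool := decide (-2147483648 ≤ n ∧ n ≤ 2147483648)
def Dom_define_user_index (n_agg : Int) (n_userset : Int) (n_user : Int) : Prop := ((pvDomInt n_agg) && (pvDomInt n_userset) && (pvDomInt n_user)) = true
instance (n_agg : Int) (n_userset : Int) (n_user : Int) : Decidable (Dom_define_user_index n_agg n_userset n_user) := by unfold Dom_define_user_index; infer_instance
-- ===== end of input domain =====

-- B computes each aggregation group's total in closed form by ceiling-division counts
-- of the group's residue class, with no pass over user_uset (objective: alternative);
-- return values proved equal on Pre_.

-- ===== PORT A =====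
-- List.modify out of range is a no-op where Python would raise IndexError;
-- such indices are excluded by Pre_ (0 < n_agg whenever the loop runs).
def define_user_index (n_agg : Int) (n_userset : Int) (n_user : Int) : List Int × List Int :=
  let user_per_uset := PySem.Int.floordiv n_user n_userset
  let mod_user_uset := PySem.Int.mod n_user n_userset
  let user_uset := (PySem.List.pyRange 0 n_userset 1).map
    (fun i => if i < mod_user_uset then user_per_uset + 1 else user_per_uset)
  let pre0 := (PySem.List.pyRange 0 n_agg 1).map (fun _ => ([] : List Int))
  let pre := (PySem.List.enumerate user_uset 0).foldl
    (fun acc js => acc.modify (PySem.Int.mod js.1 n_agg).toNat (fun l => l ++ [js.2])) pre0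
  let user_agg := (PySem.List.pyRange 0 n_agg 1).map
    (fun k => (PySem.List.pyGetD pre k ([] : List Int)).sum)
  (user_uset, user_agg)

-- ===== PORT B =====
def define_user_index_alt (n_agg : Int) (n_userset : Int) (n_user : Int) : List Int × List Int :=
  let q := PySem.Int.floordiv n_user n_userset
  let r := PySem.Int.mod n_user n_userset
  let user_uset := PySem.List.pyRepeat [q + 1] r ++ PySem.List.pyRepeat [q] (n_userset - r)
  let cnt := fun (upper k : Int) =>
    if k < upper then PySem.Int.floordiv (upper - k + n_agg - 1) n_agg else 0
  let user_agg := (PySem.List.pyRange 0 n_agg 1).map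
    (fun k => q * cnt n_userset k + cnt r k)
  (user_uset, user_agg)

-- ===== PRECONDITION & SPEC =====
-- A raises ZeroDivisionError when n_userset = 0, and (when n_userset > 0, so the loop runs)
-- ZeroDivisionError on j % 0 for n_agg = 0 / IndexError on the empty bucket list for n_agg < 0.
def Pre_define_user_index (n_agg : Int) (n_userset : Int) (n_user : Int) : Prop :=
  n_userset ≠ 0 ∧ (0 < n_agg ∨ n_userset < 0)
instance (n_agg : Int) (n_userset : Int) (n_user : Int) : Decidable (Pre_define_user_index n_agg n_userset n_user) := by unfold Pre_define_user_index; infer_instance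
def pvWitness_define_user_index : Int × Int × Int := (3, 4, 10)

def Spec_define_user_index (n_agg : Int) (n_userset : Int) (n_user : Int) (out : List Int × List Int) : Prop := out = define_user_index_alt n_agg n_userset n_user
instance (n_agg : Int) (n_userset : Int) (n_user : Int) (out : List Int × List Int) : Decidable (Spec_define_user_index n_agg n_userset n_user out) := by unfold Spec_define_user_index; infer_instance

-- ===== CLAIM (what is proved, stated in full; the proofs are below) =====
def Claim_equal_define_user_index : Prop := ∀ (n_agg : Int) (n_userset : Int) (n_user : Int), Dom_define_user_index n_agg n_userset n_user → Pre_define_user_index n_agg n_userset n_user → Spec_define_user_index n_agg n_userset n_user (define_user_index n_agg n_userset n_user)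
-- ===== LEMMAS AND PROOFS =====

-- Nat-level shape of the user_uset comprehension
theorem pv_range_ite : ∀ (n : Nat) (r : Nat) (a b : Int), r ≤ n →
    (List.range n).map (fun k => if k < r then a else b)
      = List.replicate r a ++ List.replicate (n - r) b := by
  intro n
  induction n with
  | zero => intro r a b hr; interval_cases r; simp
  | succ m ih =>
    intro r a b hr
    rcases Nat.lt_or_ge r (m + 1) with h | h
    · have hr' : r ≤ m := Nat.lt_succ_iff.mp h
      rw [List.range_succ, List.map_append, ih r a b hr']
      have hm : ¬ (m < r) := by omega
      have hstep : (m + 1) - r = (m - r) + 1 := by omega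
      rw [hstep, List.replicate_succ', List.map_cons, List.map_nil, if_neg hm,
          List.append_assoc]
    · have hr2 : r = m + 1 := le_antisymm hr h
      subst hr2
      have : ((List.range (m + 1)).map (fun k => if k < m + 1 then a else b))
          = (List.range (m + 1)).map (fun _ => a) := by
        apply List.map_congr_left
        intro k hk
        simp [List.mem_range.mp hk]
      rw [this]
      simp [List.map_const']

-- user_uset built by A equals user_uset built by B
theorem pv_uset_eq (n_userset n_user : Int) (hns : n_userset ≠ 0) :
    (PySem.List.pyRange 0 n_userset 1).map
      (fun i => if i < PySem.Int.mod n_user n_userset then PySem.Int.floordiv n_user n_userset + 1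
                else PySem.Int.floordiv n_user n_userset)
      = PySem.List.pyRepeat [PySem.Int.floordiv n_user n_userset + 1] (PySem.Int.mod n_user n_userset)
        ++ PySem.List.pyRepeat [PySem.Int.floordiv n_user n_userset] (n_userset - PySem.Int.mod n_user n_userset) := by
  set q := PySem.Int.floordiv n_user n_userset with hq
  set r := PySem.Int.mod n_user n_userset with hr
  rcases lt_or_gt_of_ne hns with hneg | hpos
  · obtain ⟨hb1, hb2⟩ := PySem.Int.mod_neg_bounds (a := n_user) hneg
    rw [← hr] at hb1 hb2
    rw [PySem.List.pyRange_one_eq_nil (by omega), PySem.List.pyRepeat_singleton,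
        PySem.List.pyRepeat_singleton]
    have h1 : r.toNat = 0 := by omega
    have h2 : (n_userset - r).toNat = 0 := by omega
    simp [h1, h2]
  · have hr0 : 0 ≤ r := hr ▸ PySem.Int.mod_nonneg (a := n_user) hpos
    have hrlt : r < n_userset := hr ▸ PySem.Int.mod_lt (a := n_user) hpos
    rw [PySem.List.pyRange_one, PySem.List.pyRepeat_singleton, PySem.List.pyRepeat_singleton,
        List.map_map]
    have key := pv_range_ite (n_userset - 0).toNat r.toNat (q + 1) q (by omega)
    have heq : ((fun i => if i < r then q + 1 else q) ∘ fun k : Nat => (0 : Int) + k)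
        = fun k : Nat => if k < r.toNat then q + 1 else q := by
      funext k
      simp only [Function.comp, zero_add]
      congr 1
      simp only [eq_iff_iff]
      omega
    rw [heq, key]
    congr 2
    omega

-- sum commutes with appending one element into a bucket
theorem pv_map_sum_modify : ∀ (pre : List (List Int)) (i : Nat) (v : Int),
    (pre.modify i (fun l => l ++ [v])).map List.sum
      = (pre.map List.sum).modify i (fun s => s + v) := by
  intro pre
  induction pre with
  | nil => intro i v; simp
  | cons h t ih =>
    intro i v
    cases i with
    | zero => simp
    | succ j => simp [ih]

-- the bucket fold and a running-sum fold are related by mapping List.sum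
theorem pv_fold_sum (m : Int) : ∀ (l : List (Int × Int)) (pre : List (List Int)),
    ((l.foldl (fun acc js => acc.modify (PySem.Int.mod js.1 m).toNat (fun b => b ++ [js.2])) pre).map List.sum)
      = l.foldl (fun acc jv => acc.modify (PySem.Int.mod jv.1 m).toNat (fun s => s + jv.2)) (pre.map List.sum) := by
  intro l
  induction l with
  | nil => intro pre; simp
  | cons h t ih => intro pre; simp [List.foldl_cons, ih, pv_map_sum_modify]

theorem pv_fold_length (m : Int) : ∀ (l : List (Int × Int)) (pre : List (List Int)),
    (l.foldl (fun acc js => acc.modify (PySem.Int.mod js.1 m).toNat (fun b => b ++ [js.2])) pre).length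
      = pre.length := by
  intro l
  induction l with
  | nil => intro pre; rfl
  | cons h t ih => intro pre; simp [List.foldl_cons, ih]

-- a modify-add fold read back at one index is the sum of the matching pairs
theorem pv_fold_get (m : Int) : ∀ (l : List (Int × Int)) (acc : List Int) (k : Nat)
    (hk : k < acc.length),
    (l.foldl (fun a jv => a.modify (PySem.Int.mod jv.1 m).toNat (fun s => s + jv.2)) acc)[k]?
      = some (acc[k] + ((l.filter (fun jv => (PySem.Int.mod jv.1 m).toNat == k)).map Prod.snd).sum) := by
  intro l
  induction l with
  | nil => intro acc k hk; simp [hk]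
  | cons h t ih =>
    intro acc k hk
    rw [List.foldl_cons]
    have hlen : (acc.modify (PySem.Int.mod h.1 m).toNat (fun s => s + h.2)).length = acc.length := by
      simp
    rw [ih _ k (by omega)]
    by_cases hik : (PySem.Int.mod h.1 m).toNat = k
    · have : (acc.modify (PySem.Int.mod h.1 m).toNat (fun s => s + h.2))[k] = acc[k] + h.2 := by
        rw [List.getElem_modify]
        simp [hik]
      rw [this]
      simp only [List.filter_cons, hik, beq_self_eq_true, if_pos trivial]
      simp [add_assoc]
    · have : (acc.modify (PySem.Int.mod h.1 m).toNat (fun s => s + h.2))[k] = acc[k] := by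
        rw [List.getElem_modify]
        simp [hik]
      rw [this]
      have : ((h.1, h.2).1, (h.1, h.2).2) = h := rfl
      simp only [List.filter_cons]
      rw [if_neg (by simpa using hik)]

-- floor division support: (m*c + x)/m = c when x < m
theorem pv_div_floor (m c x : Nat) (hm : 0 < m) (hx : x < m) : (m * c + x) / m = c := by
  rw [Nat.mul_add_div hm, Nat.div_eq_of_lt hx, Nat.add_zero]

-- counting a residue class below N, in closed form (ceiling division)
theorem pv_count_residue (m k : Nat) (hm : 0 < m) (hk : k < m) : ∀ (N : Nat),
    ((List.range N).filter (fun j => j % m == k)).length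
      = if k < N then (N - k + m - 1) / m else 0 := by
  intro N
  induction N with
  | zero => simp
  | succ N ih =>
    rw [List.range_succ, List.filter_append, List.length_append, ih]
    by_cases hkN : k < N
    · have h2 : k < N + 1 := by omega
      rw [if_pos hkN, if_pos h2]
      have hN : m * (N / m) + N % m = N := Nat.div_add_mod N m
      set c' := N / m with hc'
      set s' := N % m with hs'
      have hs'm : s' < m := Nat.mod_lt _ hm
      have hp : m * (c' + 1) = m * c' + m := by ring
      by_cases hmk : s' = k
      · have hb : (N % m == k) = true := by simp [← hs', hmk]
        rw [List.filter_cons_of_pos (by simpa using hb)]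
        have e1 : N - k + m - 1 = m * c' + (m - 1) := by omega
        have e2 : N + 1 - k + m - 1 = m * (c' + 1) + 0 := by omega
        rw [e1, e2, pv_div_floor m c' (m - 1) hm (by omega),
            pv_div_floor m (c' + 1) 0 hm hm]
        simp
      · have hb : (N % m == k) = false := by simp [← hs', hmk]
        rw [List.filter_cons_of_neg (by simpa using hb)]
        simp only [List.filter_nil, List.length_nil, Nat.add_zero]
        rcases Nat.lt_or_ge k s' with hks | hks
        · have e1 : N - k + m - 1 = m * (c' + 1) + (s' - k - 1) := by omega
          have e2 : N + 1 - k + m - 1 = m * (c' + 1) + (s' - k) := by omega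
          rw [e1, e2, pv_div_floor m (c' + 1) (s' - k - 1) hm (by omega),
              pv_div_floor m (c' + 1) (s' - k) hm (by omega)]
        · have hsk : s' < k := by omega
          have e1 : N - k + m - 1 = m * c' + (m + s' - k - 1) := by omega
          have e2 : N + 1 - k + m - 1 = m * c' + (m + s' - k) := by omega
          rw [e1, e2, pv_div_floor m c' (m + s' - k - 1) hm (by omega),
              pv_div_floor m c' (m + s' - k) hm (by omega)]
    · by_cases hkN' : k = N
      · subst hkN'
        have h1 : ¬ k < k := by omega
        have h2 : k < k + 1 := by omega
        rw [if_neg h1, if_pos h2]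
        have hmod : k % m = k := Nat.mod_eq_of_lt hk
        rw [List.filter_cons_of_pos (by simp [hmod])]
        have e2 : k + 1 - k + m - 1 = m * 1 + 0 := by omega
        rw [e2, pv_div_floor m 1 0 hm hm]
        simp
      · have h1 : ¬ k < N := hkN
        have h2 : ¬ k < N + 1 := by omega
        rw [if_neg h1, if_neg h2]
        have hNk : N % m ≠ k := by
          have : N % m = N := Nat.mod_eq_of_lt (by omega)
          omega
        rw [List.filter_cons_of_neg (by simp [hNk])]
        simp

-- the range below n filtered by "< r" is the range below r
theorem pv_range_filter_lt : ∀ (n r : Nat), r ≤ n →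
    (List.range n).filter (fun j => decide (j < r)) = List.range r := by
  intro n
  induction n with
  | zero => intro r hr; interval_cases r; simp
  | succ m ih =>
    intro r hr
    rw [List.range_succ, List.filter_append]
    rcases Nat.lt_or_ge r (m + 1) with h | h
    · have hr' : r ≤ m := Nat.lt_succ_iff.mp h
      rw [ih r hr']
      have : ¬ (m < r) := by omega
      simp [this]
    · have hr2 : r = m + 1 := le_antisymm hr h
      subst hr2
      have hall : (List.range m).filter (fun j => decide (j < m + 1)) = List.range m :=
        List.filter_eq_self.mpr (fun a ha => by
          have := List.mem_range.mp ha
          simp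
          omega)
      rw [hall]
      simp [List.range_succ]

-- the matching-pairs sum over the enumerated user_uset, in closed form
theorem pv_S (q : Int) (m' n' r' k : Nat) (hm : 0 < m') (hk : k < m') (hr : r' ≤ n') :
    (((PySem.List.enumerate ((List.range n').map (fun j => if j < r' then q + 1 else q)) 0).filter
        (fun jv => (PySem.Int.mod jv.1 (m' : Int)).toNat == k)).map Prod.snd).sum
      = q * (if k < n' then ((n' - k + m' - 1) / m' : Nat) else 0)
        + (if k < r' then ((r' - k + m' - 1) / m' : Nat) else 0) := by
  set F : Nat → Int := fun j => if j < r' then q + 1 else q with hF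
  set L : List Int := (List.range n').map F with hL
  have hlen : PySem.List.len L = (n' : Int) := by simp [PySem.List.len, hL]
  rw [PySem.List.enumerate_eq_map_pyRange L q, hlen, PySem.List.pyRange_zero_natCast,
      List.map_map, List.filter_map, List.map_map]
  have hcond : ((fun jv : Int × Int => (PySem.Int.mod jv.1 (m' : Int)).toNat == k) ∘
      ((fun j : Int => (j, PySem.List.pyGetD L j q)) ∘ fun k : Nat => (k : Int)))
      = fun j : Nat => j % m' == k := by
    funext j
    simp [Function.comp]
    omega
  rw [hcond]
  have hsnd : ((List.range n').filter (fun j => j % m' == k)).map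
        (Prod.snd ∘ ((fun j : Int => (j, PySem.List.pyGetD L j q)) ∘ fun k : Nat => (k : Int)))
      = ((List.range n').filter (fun j => j % m' == k)).map F := by
    apply List.map_congr_left
    intro j hj
    have hjn : j < n' := List.mem_range.mp (List.mem_of_mem_filter hj)
    simp only [Function.comp]
    rw [PySem.List.pyGetD_natCast, hL, PySem.List.getD_map_range F n' j q hjn]
  rw [hsnd]
  set l := (List.range n').filter (fun j => j % m' == k) with hl
  have hmapF : l.map F = l.map (fun j => q + (if (fun j => decide (j < r')) j = true then (1 : Int) else 0)) := by
    apply List.map_congr_left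
    intro j _
    by_cases hj : j < r' <;> simp [hF, hj]
  rw [hmapF, PySem.List.sum_map_add_int l (fun _ => q) _,
      PySem.List.sum_map_const_int, PySem.List.sum_map_ite_one_zero]
  -- count of the residue class below n'
  have hc1 : l.length = if k < n' then (n' - k + m' - 1) / m' else 0 := by
    rw [hl]; exact pv_count_residue m' k hm hk n'
  -- count of the residue class below r'
  have hc2 : l.countP (fun j => decide (j < r')) = if k < r' then (r' - k + m' - 1) / m' else 0 := by
    rw [hl, List.countP_eq_length_filter, List.filter_comm,
        pv_range_filter_lt n' r' hr]
    exact pv_count_residue m' k hm hk r'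
  rw [hc1, hc2]
  cases Nat.lt_or_ge k n' with
  | inl h1 =>
    cases Nat.lt_or_ge k r' with
    | inl h2 => simp [h1, h2, mul_comm]
    | inr h2 => simp [h1, Nat.not_lt.mpr h2, mul_comm]
  | inr h1 =>
    have h2 : ¬ k < r' := by omega
    simp [Nat.not_lt.mpr h1, h2, mul_comm]

-- the running-sum fold preserves the accumulator length
theorem pv_fold_length_flat (m : Int) : ∀ (l : List (Int × Int)) (acc : List Int),
    (l.foldl (fun a jv => a.modify (PySem.Int.mod jv.1 m).toNat (fun s => s + jv.2)) acc).length
      = acc.length := by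
  intro l
  induction l with
  | nil => intro acc; rfl
  | cons h t ih => intro acc; simp [List.foldl_cons, ih]

-- cast bridge between B's Int-level closed form and the Nat-level count
theorem pv_cnt_cast (m' u' k : Nat) :
    (if (k : Int) < (u' : Int) then PySem.Int.floordiv ((u' : Int) - k + m' - 1) (m' : Int) else 0)
      = ((if k < u' then (u' - k + m' - 1) / m' else 0 : Nat) : Int) := by
  by_cases h : k < u'
  · rw [if_pos (by exact_mod_cast h), if_pos h]
    have e : ((u' : Int) - k + m' - 1) = ((u' - k + m' - 1 : Nat) : Int) := by omega
    rw [e, PySem.Int.floordiv_natCast]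
  · rw [if_neg (by exact_mod_cast h), if_neg h]
    simp

-- ===== VERDICT (by name: the statement is the Claim_ definition above) =====
theorem define_user_index_spec : Claim_equal_define_user_index := by
  intro n_agg n_userset n_user _ hpre
  obtain ⟨hns, hagg⟩ := hpre
  unfold Spec_define_user_index define_user_index define_user_index_alt
  simp only []
  rw [pv_uset_eq n_userset n_user hns]
  refine Prod.ext rfl ?_
  set q := PySem.Int.floordiv n_user n_userset with hq
  set r := PySem.Int.mod n_user n_userset with hrdef
  rcases lt_or_gt_of_ne hns with hneg | hpos
  · -- n_userset < 0 : user_uset is empty, all aggregates are zero on both sides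
    obtain ⟨hb1, hb2⟩ := PySem.Int.mod_neg_bounds (a := n_user) hneg
    rw [← hrdef] at hb1 hb2
    have huset_nil : PySem.List.pyRepeat [q + 1] r ++ PySem.List.pyRepeat [q] (n_userset - r)
        = ([] : List Int) := by
      rw [PySem.List.pyRepeat_singleton, PySem.List.pyRepeat_singleton]
      have h1 : r.toNat = 0 := by omega
      have h2 : (n_userset - r).toNat = 0 := by omega
      simp [h1, h2]
    rw [huset_nil]
    apply List.map_congr_left
    intro k hk
    obtain ⟨hk0, hkm⟩ := PySem.List.mem_pyRange_one.mp hk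
    have hbuck : PySem.List.pyGetD ((PySem.List.pyRange 0 n_agg 1).map (fun _ => ([] : List Int))) k ([] : List Int) = [] := by
      simpa using PySem.List.pyGetD_map (fun _ : Int => ([] : List Int)) (PySem.List.pyRange 0 n_agg 1) k 0
    have hc1 : ¬ (k < n_userset) := by omega
    have hc2 : ¬ (k < r) := by omega
    rw [show PySem.List.enumerate ([] : List Int) 0 = [] from rfl, List.foldl_nil, hbuck,
        if_neg hc1, if_neg hc2]
    simp
  · -- n_userset > 0 (hence 0 < n_agg by Pre_)
    have hmpos : 0 < n_agg := by
      rcases hagg with h | h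
      · exact h
      · omega
    have hr0 : 0 ≤ r := hrdef ▸ PySem.Int.mod_nonneg (a := n_user) hpos
    have hrlt : r < n_userset := hrdef ▸ PySem.Int.mod_lt (a := n_user) hpos
    set n' := n_userset.toNat with hn'
    set m' := n_agg.toNat with hm'
    set r' := r.toNat with hr'
    have hncast : n_userset = (n' : Int) := by omega
    have hmcast : n_agg = (m' : Int) := by omega
    have hrcast : r = (r' : Int) := by omega
    have hm'pos : 0 < m' := by omega
    have hr'n' : r' ≤ n' := by omega
    have huset : PySem.List.pyRepeat [q + 1] r ++ PySem.List.pyRepeat [q] (n_userset - r)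
        = (List.range n').map (fun j => if j < r' then q + 1 else q) := by
      rw [PySem.List.pyRepeat_singleton, PySem.List.pyRepeat_singleton,
          pv_range_ite n' r' (q + 1) q hr'n']
      have e1 : (n_userset - r).toNat = n' - r' := by omega
      rw [e1]
    rw [huset]
    set F : Nat → Int := fun j => if j < r' then q + 1 else q with hF
    set L := (List.range n').map F with hLdef
    set pre0 := (PySem.List.pyRange 0 n_agg 1).map (fun _ => ([] : List Int)) with hpre0
    set pre := (PySem.List.enumerate L 0).foldl
      (fun acc js => acc.modify (PySem.Int.mod js.1 n_agg).toNat (fun l => l ++ [js.2])) pre0 with hpredef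
    have hprelen : pre.length = m' := by
      rw [hpredef, pv_fold_length, hpre0, List.length_map, PySem.List.length_pyRange_one]
      omega
    have hstep1 : ∀ k : Int, (PySem.List.pyGetD pre k ([] : List Int)).sum
        = PySem.List.pyGetD (pre.map List.sum) k 0 := by
      intro k
      simpa using (PySem.List.pyGetD_map List.sum pre k ([] : List Int)).symm
    have hLHS : (PySem.List.pyRange 0 n_agg 1).map (fun k => (PySem.List.pyGetD pre k ([] : List Int)).sum)
        = pre.map List.sum := by
      calc (PySem.List.pyRange 0 n_agg 1).map (fun k => (PySem.List.pyGetD pre k ([] : List Int)).sum)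
          = (PySem.List.pyRange 0 n_agg 1).map (fun k => PySem.List.pyGetD (pre.map List.sum) k 0) := by
            simp only [hstep1]
        _ = pre.map List.sum := by
            have hlen2 : n_agg = PySem.List.len (pre.map List.sum) := by
              simp [PySem.List.len, hprelen]
              omega
            rw [hlen2]
            exact PySem.List.map_pyGetD_pyRange_zero _ 0
    have hflat : pre.map List.sum
        = (PySem.List.enumerate L 0).foldl
            (fun acc jv => acc.modify (PySem.Int.mod jv.1 n_agg).toNat (fun s => s + jv.2))
            (pre0.map List.sum) := by
      rw [hpredef]
      exact pv_fold_sum n_agg _ pre0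
    have hacc0 : pre0.map List.sum = (PySem.List.pyRange 0 n_agg 1).map (fun _ => (0 : Int)) := by
      rw [hpre0, List.map_map]
      rfl
    rw [hLHS, hflat, hacc0]
    apply List.ext_getElem?
    intro k
    have hlenacc : ((PySem.List.pyRange 0 n_agg 1).map (fun _ => (0 : Int))).length = m' := by
      rw [List.length_map, PySem.List.length_pyRange_one]
      omega
    by_cases hk : k < m'
    · rw [pv_fold_get n_agg _ _ k (by rw [hlenacc]; exact hk)]
      rw [List.getElem?_map]
      have hrange : (PySem.List.pyRange 0 n_agg 1)[k]? = some ((k : Int)) := by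
        rw [List.getElem?_eq_getElem (by rw [PySem.List.length_pyRange_one]; omega)]
        rw [PySem.List.getElem_pyRange_one]
        simp
      rw [hrange]
      have hacck : ((PySem.List.pyRange 0 n_agg 1).map (fun _ => (0 : Int)))[k]'(by omega) = 0 := by
        simp
      rw [hacck]
      rw [hmcast, pv_S q m' n' r' k hm'pos hk hr'n']
      simp only [Option.map_some]
      congr 1
      rw [hncast, hrcast, pv_cnt_cast m' n' k, pv_cnt_cast m' r' k]
      push_cast
      ring
    · rw [List.getElem?_eq_none (by rw [pv_fold_length_flat, hlenacc]; omega),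
          List.getElem?_eq_none (by rw [List.length_map, PySem.List.length_pyRange_one]; omega)]
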